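-- pv_equiv track=rewrite | github.com/Soujanya02V/ada_ids_proj | dashboard.py | scan_log_file
-- ===== SOURCE A (Python) =====
-- def rabin_karp(text, pattern, q=101):
--     d = 256
--     M = len(pattern)
--     N = len(text)
--     p = 0
--     t = 0
--     h = 1
--
--     for i in range(M - 1):
--         h = (h * d) % q
--
--     for i in range(M):
--         p = (d * p + ord(pattern[i])) % q
--         t = (d * t + ord(text[i])) % q
--
--     for i in range(N - M + 1):
--         if p == t:
--             if text[i:i + M] == pattern:
--                 return True
--         if i < N - M:
--             t = (d * (t - ord(text[i]) * h) + ord(text[i + M])) % q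
--             if t < 0:
--                 t += q
--     return False
--
-- def scan_log_file(log_lines, signatures):
--     alerts = []
--     for line_number, line in enumerate(log_lines, start=1):
--         for sig in signatures:
--             if rabin_karp(line.lower(), sig.lower()):
--                 alerts.append((line_number, sig, line.strip()))
--                 break
--     return alerts
-- ===== SOURCE B (Python) =====
-- def scan_log_file(log_lines, signatures):
--     sig_pairs = [(sig, sig.lower()) for sig in signatures]
--     alerts = []
--     for idx, line in enumerate(log_lines):
--         low = line.lower()
--         hit = next((orig for orig, ls in sig_pairs if ls in low), None)
--         if hit is not None:
--             alerts.append((idx + 1, hit, line.strip()))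
--     return alerts
-- ===== Notes on version B (the rewrite author's own statement) =====
-- stated objective: faster
-- what changed: B drops A's hand-rolled per-(line,signature) Rabin-Karp rolling-hash scan and instead lowers each signature once up front and uses Python's built-in substring operator 'in' on the lowered line, taking the first matching signature.
import Mathlib
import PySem

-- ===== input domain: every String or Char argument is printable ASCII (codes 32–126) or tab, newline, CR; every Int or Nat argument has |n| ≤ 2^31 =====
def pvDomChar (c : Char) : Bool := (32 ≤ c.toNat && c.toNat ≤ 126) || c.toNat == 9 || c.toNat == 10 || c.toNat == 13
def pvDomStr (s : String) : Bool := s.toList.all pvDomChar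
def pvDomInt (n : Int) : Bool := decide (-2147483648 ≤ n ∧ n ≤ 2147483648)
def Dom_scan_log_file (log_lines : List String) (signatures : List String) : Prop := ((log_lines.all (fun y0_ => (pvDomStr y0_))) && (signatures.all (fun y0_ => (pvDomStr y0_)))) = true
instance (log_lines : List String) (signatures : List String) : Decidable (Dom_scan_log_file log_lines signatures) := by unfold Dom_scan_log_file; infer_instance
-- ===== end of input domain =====

-- B replaces A's hand-rolled Rabin–Karp hashing with direct substring search on once-lowered
-- signatures (objective: faster, constant-factor; return value only, no mutation involved).

-- ===== PORT A =====
-- ord(c) for an ASCII character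
def pvOrd (c : Char) : Int := (c.toNat : Int)

-- third loop of rabin_karp: for i in range(N - M + 1): …  (early return True modelled by
-- stopping the recursion; the `.getD ' '` indexings are taken only when i < N - M, where
-- Python's text[i] / text[i + M] are provably in range, so no IndexError can arise here)
def rkLoop3 (tl pl : List Char) (q h p : Int) (M N : Nat) : List Nat → Int → Bool
  | [], _ => false
  | i :: rest, t =>
    if p = t ∧ PySem.List.slice tl (some (i : Int)) (some ((i : Int) + (M : Int))) = pl then
      true
    else
      rkLoop3 tl pl q h p M N rest
        (if i < N - M then
          let t1 := PySem.Int.mod (256 * (t - pvOrd (tl.getD i ' ') * h) + pvOrd (tl.getD (i + M) ' ')) q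
          if t1 < 0 then t1 + q else t1
        else t)

-- rabin_karp(text, pattern, q=101); none = IndexError (raised in the second loop when
-- M > N, i.e. text[i] with i = N); pattern[i] is always in range there (i < M), ported
-- with `.getD ' '`
def rabin_karp (text pattern : String) (q : Int) : Option Bool :=
  let tl := text.toList
  let pl := pattern.toList
  let M := pl.length
  let N := tl.length
  let h := (List.range (M - 1)).foldl (fun h _ => PySem.Int.mod (h * 256) q) 1
  match (List.range M).foldl
      (fun st i =>
        st.bind (fun pt =>
          match tl[i]? with
          | none => none
          | some c =>
              some (PySem.Int.mod (256 * pt.1 + pvOrd (pl.getD i ' ')) q,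
                    PySem.Int.mod (256 * pt.2 + pvOrd c) q)))
      (some ((0 : Int), (0 : Int))) with
  | none => none
  | some pt => some (rkLoop3 tl pl q h pt.1 M N (List.range (N - M + 1)) pt.2)

-- inner `for sig in signatures: … break`; none = exception, some none = no match,
-- some (some sig) = first matching signature
def scanLine (line : String) : List String → Option (Option String)
  | [] => some none
  | sig :: rest =>
    match rabin_karp (PySem.Str.lower line) (PySem.Str.lower sig) 101 with
    | none => none
    | some true => some (some sig)
    | some false => scanLine line rest

-- outer loop over enumerate(log_lines, start=1)
def scanAux (signatures : List String) : Nat → List String → Option (List (Int × String × String))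
  | _, [] => some []
  | n, line :: rest =>
    match scanLine line signatures with
    | none => none
    | some none => scanAux signatures (n + 1) rest
    | some (some sig) =>
        (scanAux signatures (n + 1) rest).map (fun r => ((n : Int), sig, PySem.Str.strip line) :: r)

-- `.getD []` only discharges the Option: Pre_scan_log_file guarantees the scan is `some`
def scan_log_file (log_lines : List String) (signatures : List String) : List (Int × String × String) :=
  (scanAux signatures 1 log_lines).getD []

-- ===== PORT B =====
-- first pair (orig, lowered) whose lowered signature occurs in the lowered line: next(…, None)
def altAux (pairs : List (String × String)) : Nat → List String → List (Int × String × String)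
  | _, [] => []
  | n, line :: rest =>
    let low := PySem.Str.lower line
    match pairs.find? (fun pr => PySem.Str.isIn pr.2 low) with
    | some pr => (((n : Int) + 1), pr.1, PySem.Str.strip line) :: altAux pairs (n + 1) rest
    | none => altAux pairs (n + 1) rest

def scan_log_file_alt (log_lines : List String) (signatures : List String) : List (Int × String × String) :=
  altAux (signatures.map (fun s => (s, PySem.Str.lower s))) 0 log_lines

-- ===== PRECONDITION & SPEC =====
-- Pre_ excludes exactly the inputs on which A raises IndexError: some line is scanned
-- against a signature longer than the line (rabin_karp then reads text[i] out of range)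
-- before an earlier signature matched and broke the loop.
def Pre_scan_log_file (log_lines : List String) (signatures : List String) : Prop :=
  ∀ line ∈ log_lines, ∀ i, i < signatures.length →
    line.toList.length < (signatures.getD i "").toList.length →
    ∃ j, j < i ∧ PySem.Str.isIn (PySem.Str.lower (signatures.getD j "")) (PySem.Str.lower line) = true
instance (log_lines : List String) (signatures : List String) : Decidable (Pre_scan_log_file log_lines signatures) := by unfold Pre_scan_log_file; infer_instance

def pvWitness_scan_log_file : List String × List String :=
  (["User FAILED login attempt detected"], ["failed", "attack detected"])

def Spec_scan_log_file (log_lines : List String) (signatures : List String) (out : List (Int × String × String)) : Prop := out = scan_log_file_alt log_lines signatures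
instance (log_lines : List String) (signatures : List String) (out : List (Int × String × String)) : Decidable (Spec_scan_log_file log_lines signatures out) := by unfold Spec_scan_log_file; infer_instance

-- ===== CLAIM (what is proved, stated in full; the proofs are below) =====
def Claim_equal_scan_log_file : Prop := ∀ (log_lines : List String) (signatures : List String), Dom_scan_log_file log_lines signatures → Pre_scan_log_file log_lines signatures → Spec_scan_log_file log_lines signatures (scan_log_file log_lines signatures)

-- ===== LEMMAS AND PROOFS =====

-- running hash of rabin_karp's accumulation loops
def pvHash (q : Int) (cs : List Char) : Int :=
  cs.foldl (fun a c => PySem.Int.mod (256 * a + pvOrd c) q) 0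

def pvPoly (cs : List Char) : Int :=
  cs.foldl (fun a c => 256 * a + pvOrd c) 0

theorem pvPoly_foldl (cs : List Char) : ∀ x : Int,
    cs.foldl (fun a c => 256 * a + pvOrd c) x = x * 256 ^ cs.length + pvPoly cs := by
  induction cs with
  | nil => intro x; simp [pvPoly]
  | cons c cs ih =>
    intro x
    have h1 : pvPoly (c :: cs) = (256 * 0 + pvOrd c) * 256 ^ cs.length + pvPoly cs := by
      simpa [pvPoly] using ih (256 * 0 + pvOrd c)
    simp only [List.foldl_cons, List.length_cons, ih, h1]
    ring

theorem pvPoly_cons (c : Char) (cs : List Char) :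
    pvPoly (c :: cs) = pvOrd c * 256 ^ cs.length + pvPoly cs := by
  have := pvPoly_foldl cs (256 * 0 + pvOrd c)
  simpa [pvPoly] using this

theorem pvHash_append (q : Int) (cs : List Char) (c : Char) :
    pvHash q (cs ++ [c]) = PySem.Int.mod (256 * pvHash q cs + pvOrd c) q := by
  simp [pvHash, List.foldl_append]

theorem pvPoly_append (cs : List Char) (c : Char) :
    pvPoly (cs ++ [c]) = 256 * pvPoly cs + pvOrd c := by
  simp [pvPoly, List.foldl_append]

theorem pvHash_bounds (q : Int) (hq : 0 < q) (cs : List Char) :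
    0 ≤ pvHash q cs ∧ pvHash q cs < q := by
  induction cs using List.reverseRecOn with
  | nil => simpa [pvHash] using hq
  | append_singleton cs c ih =>
    rw [pvHash_append]
    exact ⟨PySem.Int.mod_nonneg _ hq, PySem.Int.mod_lt _ hq⟩

theorem pvHash_modeq (q : Int) (hq : 0 < q) (cs : List Char) :
    pvHash q cs ≡ pvPoly cs [ZMOD q] := by
  induction cs using List.reverseRecOn with
  | nil => simp [pvHash, pvPoly]
  | append_singleton cs c ih =>
    rw [pvHash_append, pvPoly_append, PySem.Int.mod_eq_emod_of_pos hq]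
    calc (256 * pvHash q cs + pvOrd c) % q
        ≡ 256 * pvHash q cs + pvOrd c [ZMOD q] :=
          show (256 * pvHash q cs + pvOrd c) % q % q = (256 * pvHash q cs + pvOrd c) % q from
            Int.emod_emod_of_dvd _ dvd_rfl
      _ ≡ 256 * pvPoly cs + pvOrd c [ZMOD q] := Int.ModEq.add_right _ (Int.ModEq.mul_left 256 ih)

theorem pv_mod_unique (q a b : Int) (hq : 0 < q) (ha : 0 ≤ a) (ha' : a < q)
    (hb : 0 ≤ b) (hb' : b < q) (h : a ≡ b [ZMOD q]) : a = b := by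
  have h1 : a % q = b % q := h
  rw [Int.emod_eq_of_lt ha ha', Int.emod_eq_of_lt hb hb'] at h1
  exact h1

theorem pv_hpow (q : Int) (hq : 1 < q) : ∀ k : Nat,
    (List.range k).foldl (fun h _ => PySem.Int.mod (h * 256) q) 1 = PySem.Int.mod (256 ^ k) q := by
  intro k
  induction k with
  | zero =>
    rw [List.range_zero, List.foldl_nil, pow_zero,
        PySem.Int.mod_eq_emod_of_pos (by omega), Int.emod_eq_of_lt (by omega) (by omega)]
  | succ k ih =>
    rw [List.range_succ, List.foldl_append, List.foldl_cons, List.foldl_nil, ih]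
    rw [PySem.Int.mod_eq_emod_of_pos (by omega), PySem.Int.mod_eq_emod_of_pos (by omega),
        PySem.Int.mod_eq_emod_of_pos (by omega)]
    rw [pow_succ]
    rw [Int.mul_emod, Int.emod_emod_of_dvd _ dvd_rfl, ← Int.mul_emod]

theorem pv_mod_modeq (q a : Int) (hq : 0 < q) : PySem.Int.mod a q ≡ a [ZMOD q] := by
  rw [PySem.Int.mod_eq_emod_of_pos hq]
  exact Int.emod_emod_of_dvd _ dvd_rfl

theorem pv_roll (q : Int) (hq : 1 < q) (tl : List Char) (M N j : Nat)
    (hN : tl.length = N) (hM : 1 ≤ M) (hj : j + M < N) :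
    PySem.Int.mod (256 * (pvHash q ((tl.drop j).take M) - pvOrd (tl.getD j ' ') * PySem.Int.mod (256 ^ (M - 1)) q) + pvOrd (tl.getD (j + M) ' ')) q
      = pvHash q ((tl.drop (j + 1)).take M) := by
  have hq0 : (0:Int) < q := by omega
  obtain ⟨m, rfl⟩ : ∃ m, M = m + 1 := ⟨M - 1, by omega⟩
  have hm : m + 1 - 1 = m := by omega
  have hjlen : j < tl.length := by omega
  have hjMlen : j + (m + 1) < tl.length := by omega
  set w : List Char := (tl.drop (j + 1)).take m with hw
  have hwlen : w.length = m := by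
    simp [hw, List.length_take, List.length_drop]; omega
  have hwin_j : (tl.drop j).take (m + 1) = tl[j] :: w := by
    rw [List.drop_eq_getElem_cons hjlen, List.take_succ_cons]
  have hwin_j1 : (tl.drop (j + 1)).take (m + 1) = w ++ [tl[j + (m + 1)]] := by
    rw [List.take_succ, ← hw, List.getElem?_drop]
    rw [List.getElem?_eq_getElem (by omega : j + 1 + m < tl.length)]
    simp [show j + 1 + m = j + (m + 1) by omega]
  have hgdj : tl.getD j ' ' = tl[j] := List.getD_eq_getElem tl ' ' hjlen
  have hgdjM : tl.getD (j + (m + 1)) ' ' = tl[j + (m + 1)] := List.getD_eq_getElem tl ' ' hjMlen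
  -- congruence of the left-hand argument with the rolled polynomial
  have hpolywin : pvPoly ((tl.drop j).take (m + 1)) = pvOrd tl[j] * 256 ^ m + pvPoly w := by
    rw [hwin_j, pvPoly_cons, hwlen]
  have hcong :
      256 * (pvHash q ((tl.drop j).take (m + 1)) - pvOrd (tl.getD j ' ') * PySem.Int.mod (256 ^ (m + 1 - 1)) q) + pvOrd (tl.getD (j + (m + 1)) ' ')
        ≡ pvPoly (w ++ [tl[j + (m + 1)]]) [ZMOD q] := by
    rw [hgdj, hgdjM, hm, pvPoly_append]
    have h1 : pvHash q ((tl.drop j).take (m + 1)) - pvOrd tl[j] * PySem.Int.mod (256 ^ m) q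
        ≡ pvPoly ((tl.drop j).take (m + 1)) - pvOrd tl[j] * 256 ^ m [ZMOD q] :=
      Int.ModEq.sub (pvHash_modeq q hq0 _) (Int.ModEq.mul_left _ (pv_mod_modeq q _ hq0))
    have h2 := Int.ModEq.add_right (pvOrd tl[j + (m + 1)]) (Int.ModEq.mul_left 256 h1)
    refine h2.trans ?_
    rw [hpolywin]
    ring_nf
    exact Int.ModEq.refl _
  rw [← hwin_j1] at hcong
  refine pv_mod_unique q _ _ hq0 (PySem.Int.mod_nonneg _ hq0) (PySem.Int.mod_lt _ hq0)
    (pvHash_bounds q hq0 _).1 (pvHash_bounds q hq0 _).2 ?_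
  exact ((pv_mod_modeq q _ hq0).trans hcong).trans (pvHash_modeq q hq0 _).symm

theorem pv_loop2 (q : Int) (tl pl : List Char) : ∀ k, k ≤ pl.length → k ≤ tl.length →
    (List.range k).foldl
      (fun st i =>
        st.bind (fun pt : Int × Int =>
          match tl[i]? with
          | none => none
          | some c =>
              some (PySem.Int.mod (256 * pt.1 + pvOrd (pl.getD i ' ')) q,
                    PySem.Int.mod (256 * pt.2 + pvOrd c) q)))
      (some ((0 : Int), (0 : Int)))
      = some (pvHash q (pl.take k), pvHash q (tl.take k)) := by
  intro k
  induction k with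
  | zero => simp [pvHash]
  | succ k ih =>
    intro h1 h2
    rw [List.range_succ, List.foldl_append, ih (by omega) (by omega), List.foldl_cons, List.foldl_nil]
    rw [List.getElem?_eq_getElem (by omega : k < tl.length)]
    have hpl : pl.take (k + 1) = pl.take k ++ [pl[k]] := by
      rw [List.take_succ, List.getElem?_eq_getElem (by omega : k < pl.length)]; rfl
    have htl : tl.take (k + 1) = tl.take k ++ [tl[k]] := by
      rw [List.take_succ, List.getElem?_eq_getElem (by omega : k < tl.length)]; rfl
    rw [hpl, htl, pvHash_append, pvHash_append, List.getD_eq_getElem pl ' ' (by omega)]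
    rfl

theorem pv_loop3 (q : Int) (hq : 1 < q) (tl pl : List Char) (M N : Nat)
    (hM : pl.length = M) (hN : tl.length = N) (hM1 : 1 ≤ M) (hMN : M ≤ N) :
    ∀ n j t, j + n = N - M + 1 → t = pvHash q ((tl.drop j).take M) →
    (rkLoop3 tl pl q (PySem.Int.mod (256 ^ (M - 1)) q) (pvHash q pl) M N (List.range' j n) t = true
      ↔ ∃ k, j ≤ k ∧ k + M ≤ N ∧ (tl.drop k).take M = pl) := by
  have hq0 : (0:Int) < q := by omega
  intro n
  induction n with
  | zero =>
    intro j t hj ht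
    simp only [List.range', rkLoop3]
    constructor
    · intro h; exact absurd h (by simp)
    · rintro ⟨k, hk1, hk2, _⟩; omega
  | succ n ih =>
    intro j t hj ht
    rw [List.range'_succ]
    rw [rkLoop3, PySem.List.slice_natCast_add]
    by_cases hg : pvHash q pl = t ∧ (tl.drop j).take M = pl
    · rw [if_pos hg]
      simp only [true_iff]
      exact ⟨j, le_refl j, by omega, hg.2⟩
    · rw [if_neg hg]
      have hwin_ne : (tl.drop j).take M ≠ pl := by
        intro hwin
        exact hg ⟨by rw [ht, hwin], hwin⟩
      by_cases hlt : j < N - M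
      · have ht1nn : ¬ (PySem.Int.mod (256 * (t - pvOrd (tl.getD j ' ') * PySem.Int.mod (256 ^ (M - 1)) q) + pvOrd (tl.getD (j + M) ' ')) q < 0) :=
          not_lt.mpr (PySem.Int.mod_nonneg _ hq0)
        -- the updated t is the hash of the next window
        rw [if_pos hlt]
        simp only [ht1nn, if_false]
        rw [ht, pv_roll q hq tl M N j hN hM1 (by omega)]
        rw [ih (j + 1) _ (by omega) rfl]
        constructor
        · rintro ⟨k, hk1, hk2, hk3⟩; exact ⟨k, by omega, hk2, hk3⟩
        · rintro ⟨k, hk1, hk2, hk3⟩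
          rcases Nat.eq_or_lt_of_le hk1 with h | h
          · exact absurd (h ▸ hk3) hwin_ne
          · exact ⟨k, by omega, hk2, hk3⟩
      · have hn0 : n = 0 := by omega
        have hjeq : j = N - M := by omega
        subst hn0
        simp only [List.range', rkLoop3, if_neg hlt]
        constructor
        · intro h; exact absurd h (by simp)
        · rintro ⟨k, hk1, hk2, hk3⟩
          have : k = j := by omega
          exact absurd (this ▸ hk3) hwin_ne

theorem rabin_karp_eq (text pattern : String)
    (h : pattern.toList.length ≤ text.toList.length) :
    rabin_karp text pattern 101 = some (PySem.Chars.isIn pattern.toList text.toList) := by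
  have hq : (1:Int) < 101 := by norm_num
  simp only [rabin_karp]
  rw [pv_loop2 101 text.toList pattern.toList pattern.toList.length (le_refl _) h]
  simp only []
  rcases Nat.eq_zero_or_pos pattern.toList.length with h0 | hpos
  · -- empty pattern: the very first window check succeeds
    have hpl : pattern.toList = [] := List.length_eq_zero_iff.mp h0
    rw [h0, show List.range (text.toList.length - 0 + 1)
          = 0 :: List.range' 1 (text.toList.length - 0) from by
        rw [List.range_eq_range', List.range'_succ]]
    rw [rkLoop3]
    rw [if_pos ⟨by simp [pvHash], by rw [PySem.List.slice_natCast_add]; simp [hpl]⟩]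
    simp [hpl, PySem.Chars.isIn_nil]
  · rw [pv_hpow 101 hq (pattern.toList.length - 1), List.take_length]
    rw [List.range_eq_range']
    have hiff := pv_loop3 101 hq text.toList pattern.toList pattern.toList.length
      text.toList.length rfl rfl hpos h
      (text.toList.length - pattern.toList.length + 1) 0
      (pvHash 101 (List.take pattern.toList.length text.toList)) (by omega)
      (by rw [List.drop_zero])
    rw [Option.some.injEq, Bool.eq_iff_iff, hiff]
    rw [← PySem.Chars.exists_prefix_drop_iff_isIn]
    constructor
    · rintro ⟨k, _, hk2, hk3⟩
      exact ⟨k, hk3 ▸ List.take_prefix _ _⟩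
    · rintro ⟨j, hj⟩
      have hlen : pattern.toList.length ≤ (text.toList.drop j).length := hj.length_le
      rw [List.length_drop] at hlen
      refine ⟨j, by omega, by omega, ?_⟩
      exact (List.prefix_iff_eq_take.mp hj).symm

theorem pv_lower_len (s : String) : (PySem.Str.lower s).toList.length = s.toList.length := by
  rw [PySem.Str.toList_lower]
  simp [PySem.Chars.lower]

def PreLine (line : String) : List String → Prop
  | [] => True
  | sig :: rest =>
      sig.toList.length ≤ line.toList.length ∧
        (PySem.Str.isIn (PySem.Str.lower sig) (PySem.Str.lower line) = true ∨ PreLine line rest)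

theorem pre_to_preLine (line : String) : ∀ sigs : List String,
    (∀ i, i < sigs.length → line.toList.length < (sigs.getD i "").toList.length →
      ∃ j, j < i ∧ PySem.Str.isIn (PySem.Str.lower (sigs.getD j "")) (PySem.Str.lower line) = true) →
    PreLine line sigs := by
  intro sigs
  induction sigs with
  | nil => intro _; trivial
  | cons sig rest ih =>
    intro H
    have hlen : sig.toList.length ≤ line.toList.length := by
      by_contra hlt
      obtain ⟨j, hj, _⟩ := H 0 (by simp) (by simpa using not_le.mp hlt)
      omega
    refine ⟨hlen, ?_⟩
    by_cases hm : PySem.Str.isIn (PySem.Str.lower sig) (PySem.Str.lower line) = true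
    · exact Or.inl hm
    · refine Or.inr (ih ?_)
      intro i hi hlong
      obtain ⟨j, hj, hmatch⟩ := H (i + 1) (by simpa using hi) (by simpa using hlong)
      cases j with
      | zero => exact absurd (by simpa using hmatch) hm
      | succ j' => exact ⟨j', by omega, by simpa using hmatch⟩

theorem scanLine_eq (line : String) : ∀ sigs : List String, PreLine line sigs →
    scanLine line sigs
      = some (sigs.find? (fun s => PySem.Str.isIn (PySem.Str.lower s) (PySem.Str.lower line))) := by
  intro sigs
  induction sigs with
  | nil => intro _; rfl
  | cons sig rest ih =>
    rintro ⟨hlen, hrest⟩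
    have hlen' : (PySem.Str.lower sig).toList.length ≤ (PySem.Str.lower line).toList.length := by
      rw [pv_lower_len, pv_lower_len]; exact hlen
    rw [scanLine, rabin_karp_eq _ _ hlen']
    have hiff : PySem.Chars.isIn (PySem.Str.lower sig).toList (PySem.Str.lower line).toList
        = PySem.Str.isIn (PySem.Str.lower sig) (PySem.Str.lower line) := by
      simp [PySem.Str.isIn]
    rw [hiff]
    by_cases hm : PySem.Str.isIn (PySem.Str.lower sig) (PySem.Str.lower line) = true
    · rw [hm]
      simp only []
      rw [List.find?_cons_of_pos
        (p := fun s => PySem.Str.isIn (PySem.Str.lower s) (PySem.Str.lower line)) (by simpa using hm)]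
    · rw [Bool.not_eq_true] at hm
      have hm2 : PySem.Chars.isIn (PySem.Chars.lower sig.toList) (PySem.Chars.lower line.toList) = false := by
        simpa [PySem.Str.isIn, PySem.Str.toList_lower] using hm
      rw [hm]
      simp only []
      rw [List.find?_cons_of_neg
        (p := fun s => PySem.Str.isIn (PySem.Str.lower s) (PySem.Str.lower line)) (by simp [hm2])]
      exact ih (hrest.resolve_left (by simp [hm2]))

theorem scanAux_eq (sigs : List String) : ∀ (lines : List String) (n : Nat),
    (∀ line ∈ lines, PreLine line sigs) →
    scanAux sigs (n + 1) lines
      = some (altAux (sigs.map (fun s => (s, PySem.Str.lower s))) n lines) := by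
  intro lines
  induction lines with
  | nil => intro n _; rfl
  | cons line rest ih =>
    intro n H
    rw [scanAux, altAux, scanLine_eq line sigs (H line (by simp))]
    rw [List.find?_map]
    have hcomp : ((fun pr : String × String => PySem.Str.isIn pr.2 (PySem.Str.lower line)) ∘
        (fun s => (s, PySem.Str.lower s)))
        = fun s => PySem.Str.isIn (PySem.Str.lower s) (PySem.Str.lower line) := rfl
    rw [hcomp]
    cases hf : sigs.find? (fun s => PySem.Str.isIn (PySem.Str.lower s) (PySem.Str.lower line)) with
    | none =>
      simp only [Option.map_none]
      exact ih (n + 1) (fun l hl => H l (by simp [hl]))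
    | some s =>
      simp only [Option.map_some]
      rw [ih (n + 1) (fun l hl => H l (by simp [hl]))]
      simp only [Option.map_some, Option.some.injEq]
      push_cast
      rfl

-- ===== VERDICT (by name: the statement is the Claim_ definition above) =====
theorem scan_log_file_spec : Claim_equal_scan_log_file := by
  intro log_lines signatures _ hpre
  unfold Spec_scan_log_file scan_log_file scan_log_file_alt
  rw [scanAux_eq signatures log_lines 0 (fun line hl => pre_to_preLine line signatures (hpre line hl))]
  rfl
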